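-- pv_equiv track=rewrite | github.com/Tamara911/PycharmProjects | lesson4/task3.py | max_el
-- ===== SOURCE A (Python) =====
-- def max_el(array,start,last):
--     if(last>start):
--         m = max_el(array, start, last-1)
--         if(m>array[last]):
--             return m
--         else:
--             return array[last]
--     if(last == start):
--         return array[last]
--     if(last<start):
--         return None
-- ===== SOURCE B (Python) =====
-- def max_el(array, start, last):
--     if last < start:
--         return None
--     m = array[start]
--     for i in range(start, last + 1):
--         if array[i] > m:
--             m = array[i]
--     return m
-- ===== Notes on version B (the rewrite author's own statement) =====
-- stated objective: simpler
-- what changed: Replaced the tail recursion over a shrinking [start,last-1] range by a single iterative forward scan keeping a running maximum.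
import Mathlib
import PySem

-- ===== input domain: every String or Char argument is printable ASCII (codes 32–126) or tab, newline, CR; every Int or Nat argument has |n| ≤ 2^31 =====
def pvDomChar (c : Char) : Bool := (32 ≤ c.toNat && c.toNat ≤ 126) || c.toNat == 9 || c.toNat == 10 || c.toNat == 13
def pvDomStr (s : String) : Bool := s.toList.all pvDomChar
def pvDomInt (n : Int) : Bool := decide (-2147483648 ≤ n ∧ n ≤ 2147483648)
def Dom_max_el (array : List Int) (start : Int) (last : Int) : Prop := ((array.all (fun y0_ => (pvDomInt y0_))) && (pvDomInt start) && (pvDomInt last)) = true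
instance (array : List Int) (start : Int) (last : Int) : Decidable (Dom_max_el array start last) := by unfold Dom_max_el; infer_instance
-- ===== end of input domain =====

-- B replaces A's tail recursion over a shrinking range by one iterative forward scan with a running maximum (simpler, O(1) space).


-- ===== PORT A =====
-- Literal port of A's recursion; array[i] is PySem.List.pyGet? (Python indexing, negative i from the end; none = IndexError, excluded by Pre_).
def max_el (array : List Int) (start : Int) (last : Int) : Option Int :=
  if last > start then
    match max_el array start (last - 1), PySem.List.pyGet? array last with
    | some m, some a => if m > a then some m else some a
    | _, _ => none
  else if last = start then
    PySem.List.pyGet? array last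
  else
    none
termination_by (last - start).toNat
decreasing_by omega

-- ===== PORT B =====
-- the for-loop of Source B: scan indices, keeping the running maximum m (pyGet? = Python indexing; none = IndexError, excluded by Pre_)
def maxElScan (array : List Int) : List Int → Int → Option Int
  | [], m => some m
  | i :: rest, m =>
    match PySem.List.pyGet? array i with
    | none => none
    | some a => maxElScan array rest (if a > m then a else m)

def max_el_alt (array : List Int) (start : Int) (last : Int) : Option Int :=
  if last < start then
    none
  else
    match PySem.List.pyGet? array start with
    | none => none
    | some m => maxElScan array (PySem.List.pyRange start (last + 1) 1) m

-- ===== PRECONDITION & SPEC =====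
-- Pre_ excludes exactly the inputs on which Python A raises IndexError: start ≤ last but some accessed
-- index in start..last is out of Python's range (valid indices are -len(array) ≤ i < len(array), so
-- negative indices that wrap from the end are ADMITTED and matched; A returns on every admitted input).
def Pre_max_el (array : List Int) (start : Int) (last : Int) : Prop :=
  start ≤ last → (-(array.length : Int) ≤ start ∧ last < (array.length : Int))
instance (array : List Int) (start : Int) (last : Int) : Decidable (Pre_max_el array start last) := by
  unfold Pre_max_el; infer_instance
def pvWitness_max_el : List Int × Int × Int := ([3, -1, 4, 1], 1, 3)

def Spec_max_el (array : List Int) (start : Int) (last : Int) (out : Option Int) : Prop := out = max_el_alt array start last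
instance (array : List Int) (start : Int) (last : Int) (out : Option Int) : Decidable (Spec_max_el array start last out) := by unfold Spec_max_el; infer_instance

-- ===== CLAIM (what is proved, stated in full; the proofs are below) =====
def Claim_equal_max_el : Prop := ∀ (array : List Int) (start : Int) (last : Int), Dom_max_el array start last → Pre_max_el array start last → Spec_max_el array start last (max_el array start last)

-- ===== LEMMAS AND PROOFS =====

theorem maxElScan_append (array : List Int) (r : List Int) (j : Int) (m : Int) :
    maxElScan array (r ++ [j]) m =
      (maxElScan array r m).bind (fun m' =>
        (PySem.List.pyGet? array j).map (fun a => if a > m' then a else m')) := by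
  induction r generalizing m with
  | nil =>
    simp only [List.nil_append, maxElScan]
    cases PySem.List.pyGet? array j <;> simp
  | cons i rest ih =>
    simp only [List.cons_append, maxElScan]
    cases PySem.List.pyGet? array i <;> simp [ih]

theorem max_el_alt_step (array : List Int) (start last : Int) (h : start ≤ last - 1) :
    max_el_alt array start last =
      (max_el_alt array start (last - 1)).bind (fun m' =>
        (PySem.List.pyGet? array last).map (fun a => if a > m' then a else m')) := by
  unfold max_el_alt
  rw [if_neg (by omega), if_neg (by omega)]
  cases PySem.List.pyGet? array start with
  | none => simp
  | some m =>
    have hr : PySem.List.pyRange start (last + 1) 1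
        = PySem.List.pyRange start (last - 1 + 1) 1 ++ [last] := by
      simpa using PySem.List.pyRange_one_succ_right (show start ≤ last by omega)
    dsimp only
    rw [hr, maxElScan_append]

theorem max_el_eq_alt (array : List Int) (start last : Int) :
    max_el array start last = max_el_alt array start last := by
  by_cases hlt : last < start
  · rw [max_el, max_el_alt, if_pos hlt, if_neg (by omega), if_neg (by omega)]
  · obtain ⟨n, hn⟩ : ∃ n : ℕ, last = start + n := ⟨(last - start).toNat, by omega⟩
    subst hn
    clear hlt
    induction n with
    | zero =>
      simp only [Nat.cast_zero, add_zero]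
      rw [max_el, max_el_alt, if_neg (lt_irrefl start), if_pos rfl, if_neg (lt_irrefl start)]
      cases h : PySem.List.pyGet? array start with
      | none => rfl
      | some m =>
        dsimp only
        rw [PySem.List.pyRange_one_singleton]
        simp [maxElScan, h]
    | succ k ih =>
      rw [max_el, if_pos (by omega)]
      have hstep := max_el_alt_step array start (start + (k + 1 : ℕ)) (by push_cast; omega)
      have harg : (start + (k + 1 : ℕ) : Int) - 1 = start + (k : ℕ) := by push_cast; omega
      rw [harg] at hstep
      rw [hstep, ← ih]
      rw [harg]
      cases max_el array start (start + (k : ℕ)) with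
      | none => simp
      | some m =>
        cases PySem.List.pyGet? array (start + (k + 1 : ℕ)) with
        | none => simp
        | some a =>
          simp only [Option.bind_some, Option.map_some]
          by_cases h1 : m > a <;> by_cases h2 : a > m <;> simp [h1, h2] <;> omega

-- ===== VERDICT (by name: the statement is the Claim_ definition above) =====
theorem max_el_spec : Claim_equal_max_el := by
  intro array start last _ _
  exact max_el_eq_alt array start last
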